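-- pv_equiv track=rewrite | github.com/16NS-QuangDuy/Convert_from_excel_to_Word | services/excelML.py | organize_bit_field
-- ===== SOURCE A (Python) =====
-- def organize_bit_field(bit_list, access_size=32):
--     """
--     :param bit_list: list of bitname, width
--     :param access_size: 32 as default
--     :return: None
--     """
--     out_list = []
--     start_bit, end_bit = access_size-1, 0
--     for idx, (bitname, width) in enumerate(bit_list):
--         end_bit = start_bit + 1 - int(width)
--         out_list.append([bitname, "%s" % start_bit, "%s" % end_bit])
--         start_bit = end_bit-1
--     return out_list
-- ===== SOURCE B (Python) =====
-- from itertools import accumulate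
--
-- def organize_bit_field(bit_list, access_size=32):
--     cum = list(accumulate(int(w) for _, w in bit_list))
--     return [[name, "%s" % (access_size - 1 - (c - int(w))), "%s" % (access_size - c)]
--             for (name, w), c in zip(bit_list, cum)]
-- ===== Notes on version B (the rewrite author's own statement) =====
-- stated objective: alternative
-- what changed: Replaces the single loop threading a running start_bit through mutable state with a prefix-sum table of widths (itertools.accumulate) followed by an independent map that computes each row's start/end directly from the cumulative offset.
import Mathlib
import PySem

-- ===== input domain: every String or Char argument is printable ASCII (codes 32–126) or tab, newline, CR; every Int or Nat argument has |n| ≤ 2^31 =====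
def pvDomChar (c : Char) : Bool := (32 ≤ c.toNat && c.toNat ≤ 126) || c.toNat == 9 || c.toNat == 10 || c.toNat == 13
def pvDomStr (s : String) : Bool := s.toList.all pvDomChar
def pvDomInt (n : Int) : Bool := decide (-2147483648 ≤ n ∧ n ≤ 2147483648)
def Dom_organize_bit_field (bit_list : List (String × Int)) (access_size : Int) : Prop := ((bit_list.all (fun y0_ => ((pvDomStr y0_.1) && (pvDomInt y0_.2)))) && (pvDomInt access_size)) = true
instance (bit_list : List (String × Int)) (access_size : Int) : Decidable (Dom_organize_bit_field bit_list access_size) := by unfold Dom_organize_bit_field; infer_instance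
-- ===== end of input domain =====

-- ===== PORT A =====
-- B replaces the mutable running start_bit with a prefix-sum table + map; return value proved equal (objective: alternative decomposition).
def organize_bit_field (bit_list : List (String × Int)) (access_size : Int) : List (List String) :=
  (bit_list.foldl
    (fun (st : List (List String) × Int) p =>
      let end_bit : Int := st.2 + 1 - p.2
      (st.1 ++ [[p.1, PySem.Int.toStr st.2, PySem.Int.toStr end_bit]], end_bit - 1))
    ([], access_size - 1)).1

-- ===== PORT B =====
def organize_bit_field_alt (bit_list : List (String × Int)) (access_size : Int) : List (List String) :=
  -- cum = list(accumulate(w for _, w in bit_list))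
  let cum : List Int := ((bit_list.map Prod.snd).scanl (· + ·) 0).drop 1
  (bit_list.zip cum).map
    (fun q => [q.1.1, PySem.Int.toStr (access_size - 1 - (q.2 - q.1.2)), PySem.Int.toStr (access_size - q.2)])

-- ===== PRECONDITION & SPEC =====
def Spec_organize_bit_field (bit_list : List (String × Int)) (access_size : Int) (out : List (List String)) : Prop := out = organize_bit_field_alt bit_list access_size
instance (bit_list : List (String × Int)) (access_size : Int) (out : List (List String)) : Decidable (Spec_organize_bit_field bit_list access_size out) := by unfold Spec_organize_bit_field; infer_instance

-- ===== CLAIM (what is proved, stated in full; the proofs are below) =====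
def Claim_equal_organize_bit_field : Prop := ∀ (bit_list : List (String × Int)) (access_size : Int), Dom_organize_bit_field bit_list access_size → Spec_organize_bit_field bit_list access_size (organize_bit_field bit_list access_size)

-- ===== LEMMAS AND PROOFS =====

-- ===== VERDICT (by name: the statement is the Claim_ definition above) =====
-- Loop invariant: A's fold from state (acc, s) with s = access_size - 1 - c0 produces
-- acc ++ the rows B builds from the prefix sums starting at base c0.
theorem obf_key (access_size : Int) :
    ∀ (bl : List (String × Int)) (acc : List (List String)) (c0 s : Int),
      s = access_size - 1 - c0 →
      (bl.foldl
        (fun (st : List (List String) × Int) p =>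
          let end_bit : Int := st.2 + 1 - p.2
          (st.1 ++ [[p.1, PySem.Int.toStr st.2, PySem.Int.toStr end_bit]], end_bit - 1))
        (acc, s)).1
      = acc ++ (bl.zip (((bl.map Prod.snd).scanl (· + ·) c0).drop 1)).map
          (fun q => [q.1.1, PySem.Int.toStr (access_size - 1 - (q.2 - q.1.2)), PySem.Int.toStr (access_size - q.2)]) := by
  intro bl
  induction bl with
  | nil => intro acc c0 s hs; simp
  | cons hd tl ih =>
    intro acc c0 s hs
    simp only [List.foldl_cons, List.map_cons, List.scanl_cons, List.drop_succ_cons,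
      List.drop_zero]
    have hscan : List.scanl (fun x1 x2 => x1 + x2) (c0 + hd.2) (List.map Prod.snd tl)
        = (c0 + hd.2) :: (List.scanl (fun x1 x2 => x1 + x2) (c0 + hd.2) (List.map Prod.snd tl)).drop 1 := by
      cases tl <;> simp [List.scanl]
    rw [hscan, List.zip_cons_cons, List.map_cons]
    rw [ih (acc ++ [[hd.1, PySem.Int.toStr s, PySem.Int.toStr (s + 1 - hd.2)]]) (c0 + hd.2) _ (by omega)]
    have h1 : access_size - 1 - (c0 + hd.2 - hd.2) = s := by omega
    have h2 : access_size - (c0 + hd.2) = s + 1 - hd.2 := by omega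
    rw [h1, h2]
    simp

theorem organize_bit_field_spec : Claim_equal_organize_bit_field := by
  intro bl as _
  unfold Spec_organize_bit_field organize_bit_field organize_bit_field_alt
  simpa using obf_key as bl [] 0 (as - 1) (by omega)
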